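-- pv_equiv track=rewrite | github.com/IGL-HKUST/UNIC | misc/split_garment_to_parts.py | merge_parts_by_mtl
-- ===== SOURCE A (Python) =====
-- from copy import deepcopy
--
-- def merge_parts_by_mtl(parts):
--     mtl_dict = {}
--     for i in range(len(parts)):
--         part = parts[i]
--         mtl = part[1]
--         if mtl not in mtl_dict.keys():
--             mtl_dict[mtl] = [i]
--         else:
--             mtl_dict[mtl].append(i)
--
--     mtl_parts = []
--     for mtl in mtl_dict.keys():
--         part_idx = mtl_dict[mtl]
--         mtl_part = []
--         for i in range(len(part_idx)):
--             pid = part_idx[i]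
--             if i == 0:
--                 mtl_part += parts[pid]
--             else:
--                 mtl_part += parts[pid][2:]
--         mtl_parts.append(deepcopy(mtl_part))
--
--     return mtl_parts
-- ===== SOURCE B (Python) =====
-- def merge_parts_by_mtl(parts):
--     merged = {}
--     for part in parts:
--         mtl = part[1]
--         if mtl in merged:
--             merged[mtl] = merged[mtl] + part[2:]
--         else:
--             merged[mtl] = list(part)
--     return [list(v) for v in merged.values()]
-- ===== Notes on version B (the rewrite author's own statement) =====
-- stated objective: simpler
-- what changed: B makes a single pass maintaining a dict from material to the already-merged part list (copying the first part, appending part[2:] on later hits), replacing A's two-phase scheme of an index-grouping table followed by a second index-driven concatenation loop.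
import Mathlib
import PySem

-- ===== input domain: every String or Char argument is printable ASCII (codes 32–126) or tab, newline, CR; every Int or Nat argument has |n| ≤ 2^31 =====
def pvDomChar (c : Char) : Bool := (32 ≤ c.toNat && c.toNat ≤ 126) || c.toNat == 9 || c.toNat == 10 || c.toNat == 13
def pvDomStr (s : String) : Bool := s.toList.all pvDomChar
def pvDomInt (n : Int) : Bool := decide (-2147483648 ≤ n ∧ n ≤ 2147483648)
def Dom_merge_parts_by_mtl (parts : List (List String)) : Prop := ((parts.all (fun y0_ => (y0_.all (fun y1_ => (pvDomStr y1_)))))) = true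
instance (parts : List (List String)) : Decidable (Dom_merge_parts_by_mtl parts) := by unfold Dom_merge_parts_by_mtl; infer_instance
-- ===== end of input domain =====

-- B folds A's index-grouping table and second concatenation loop into ONE pass keeping a dict
-- material -> merged list (objective: simpler). Equivalence proved on parts whose entries all
-- have length >= 2 (elsewhere Python A raises IndexError on part[1]).


-- ===== PORT A =====
-- phase 1 of A: mtl_dict maps material -> list of part indices (the first for-loop)
def pvMtlDictA (parts : List (List String)) : PySem.Dict String (List Int) :=
  (PySem.List.pyRange 0 (PySem.List.len parts)).foldl (fun d i =>
    let part := PySem.List.pyGetD parts i []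
    let mtl := PySem.List.pyGetD part 1 ""
    if d.contains mtl then d.insert mtl (d.getD mtl [] ++ [i])
    else d.insert mtl [i]) PySem.Dict.empty

-- A's inner concatenation loop over one index list
def pvInnerA (parts : List (List String)) (part_idx : List Int) : List String :=
  (PySem.List.pyRange 0 (PySem.List.len part_idx)).foldl (fun mp i =>
    let pid := PySem.List.pyGetD part_idx i 0
    if i == 0 then mp ++ PySem.List.pyGetD parts pid []
    else mp ++ PySem.List.slice (PySem.List.pyGetD parts pid []) (some 2) none) []

def merge_parts_by_mtl (parts : List (List String)) : List (List String) :=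
  let mtl_dict := pvMtlDictA parts
  mtl_dict.keys.foldl (fun acc mtl =>
    let part_idx := mtl_dict.getD mtl []
    acc ++ [pvInnerA parts part_idx]) []

-- ===== PORT B =====
-- B's single pass: merged maps material -> already-merged part list
def pvMergedB (parts : List (List String)) : PySem.Dict String (List String) :=
  parts.foldl (fun d part =>
    let mtl := PySem.List.pyGetD part 1 ""
    match d.get? mtl with
    | some v => d.insert mtl (v ++ PySem.List.slice part (some 2) none)
    | none => d.insert mtl part) PySem.Dict.empty

def merge_parts_by_mtl_alt (parts : List (List String)) : List (List String) :=
  (pvMergedB parts).values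

-- ===== PRECONDITION & SPEC =====
-- Pre_ excludes exactly the inputs on which Python A raises IndexError: a part with fewer than 2 entries (part[1]).
def Pre_merge_parts_by_mtl (parts : List (List String)) : Prop :=
  ∀ part ∈ parts, 2 ≤ part.length
instance (parts : List (List String)) : Decidable (Pre_merge_parts_by_mtl parts) := by
  unfold Pre_merge_parts_by_mtl; infer_instance
def pvWitness_merge_parts_by_mtl : List (List String) :=
  [["a", "m", "x"], ["b", "m", "y", "z"], ["c", "n"]]

def Spec_merge_parts_by_mtl (parts : List (List String)) (out : List (List String)) : Prop := out = merge_parts_by_mtl_alt parts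
instance (parts : List (List String)) (out : List (List String)) : Decidable (Spec_merge_parts_by_mtl parts out) := by unfold Spec_merge_parts_by_mtl; infer_instance

-- ===== CLAIM (what is proved, stated in full; the proofs are below) =====
def Claim_equal_merge_parts_by_mtl : Prop := ∀ (parts : List (List String)), Dom_merge_parts_by_mtl parts → Pre_merge_parts_by_mtl parts → Spec_merge_parts_by_mtl parts (merge_parts_by_mtl parts)

-- ===== LEMMAS AND PROOFS =====

theorem pvSlice2 (p : List String) : PySem.List.slice p (some 2) none = p.drop 2 := by
  rw [PySem.List.slice_from _ (by omega : (0:Int) ≤ 2)]; rfl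

-- closed form of A's inner concatenation loop over an index list
def pvRender (parts : List (List String)) (idxs : List Int) : List String :=
  match idxs with
  | [] => []
  | p :: rest =>
      PySem.List.pyGetD parts p [] ++
        rest.flatMap (fun q => (PySem.List.pyGetD parts q []).drop 2)

theorem pvRender_snoc (parts : List (List String)) (idxs : List Int) (j : Int)
    (h : idxs ≠ []) :
    pvRender parts (idxs ++ [j]) =
      pvRender parts idxs ++ (PySem.List.pyGetD parts j []).drop 2 := by
  cases idxs with
  | nil => exact absurd rfl h
  | cons p rest => simp [pvRender, List.flatMap_def]

theorem pvInner_eq_render (parts : List (List String)) (idxs : List Int) :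
    pvInnerA parts idxs = pvRender parts idxs := by
  cases idxs with
  | nil => rfl
  | cons p rest =>
    unfold pvInnerA
    have hlen : PySem.List.len (p :: rest) = ((p :: rest).length : Int) := by
      simp [PySem.List.len]
    rw [hlen, PySem.List.pyRange_one_cons (by exact_mod_cast Nat.succ_pos rest.length)]
    simp only [List.foldl_cons, beq_self_eq_true, if_true, List.nil_append,
      PySem.List.pyGetD_zero_cons, zero_add]
    rw [PySem.List.foldl_congr_mem _ _
      (fun acc j => (fun mp (q : Int) => mp ++ (PySem.List.pyGetD parts q []).drop 2)
        acc (PySem.List.pyGetD (p :: rest) j 0)) _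
      (by
        intro acc i hi
        have hmem := PySem.List.mem_pyRange_one.mp hi
        have h0 : (i == 0) = false := by
          simp only [beq_eq_false_iff_ne]; omega
        simp only [h0, Bool.false_eq_true, if_false, pvSlice2])]
    rw [PySem.List.foldl_pyRange_pyGetD' (p :: rest) 0
      (fun mp (q : Int) => mp ++ (PySem.List.pyGetD parts q []).drop 2)
      (PySem.List.pyGetD parts p []) (by omega : (0:Int) ≤ 1)]
    simp [pvRender, List.flatMap_def]

-- the two phase-1 loop bodies, on (index, part) pairs
def pvStepA (d : PySem.Dict String (List Int)) (ip : Int × List String) :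
    PySem.Dict String (List Int) :=
  let mtl := PySem.List.pyGetD ip.2 1 ""
  if d.contains mtl then d.insert mtl (d.getD mtl [] ++ [ip.1])
  else d.insert mtl [ip.1]

def pvStepB (d : PySem.Dict String (List String)) (ip : Int × List String) :
    PySem.Dict String (List String) :=
  let mtl := PySem.List.pyGetD ip.2 1 ""
  match d.get? mtl with
  | some v => d.insert mtl (v ++ PySem.List.slice ip.2 (some 2) none)
  | none => d.insert mtl ip.2

-- B's one-pass dict mirrors A's index dict through pvRender
theorem pvDict_rel (parts : List (List String))
    (pairs : List (Int × List String))
    (dA : PySem.Dict String (List Int)) (dB : PySem.Dict String (List String))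
    (hval : ∀ ip ∈ pairs, PySem.List.pyGetD parts ip.1 [] = ip.2)
    (hnd : dA.keys.Nodup)
    (hne : ∀ kv ∈ dA.items, kv.2 ≠ ([] : List Int))
    (hrel : dB.items = dA.items.map (fun kv => (kv.1, pvRender parts kv.2))) :
    (pairs.foldl pvStepA dA).keys.Nodup ∧
      (pairs.foldl pvStepB dB).items =
        ((pairs.foldl pvStepA dA).items).map (fun kv => (kv.1, pvRender parts kv.2)) := by
  induction pairs generalizing dA dB with
  | nil => exact ⟨hnd, by simpa using hrel⟩
  | cons ip rest ih =>
    obtain ⟨i, p⟩ := ip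
    have hvp : PySem.List.pyGetD parts i [] = p := hval (i, p) (by simp)
    have hkeysB : dB.keys = dA.keys := by
      simp only [PySem.Dict.keys, hrel, List.map_map]
      rfl
    simp only [List.foldl_cons]
    by_cases hc : dA.contains (PySem.List.pyGetD p 1 "") = true
    · -- existing key
      set mtl := PySem.List.pyGetD p 1 "" with hmtl
      obtain ⟨v₀, hv₀⟩ : ∃ v₀, dA.get? mtl = some v₀ := by
        rw [PySem.Dict.contains_eq_isSome_get?] at hc
        exact Option.isSome_iff_exists.mp hc
      have hmemA : (mtl, v₀) ∈ dA.items := PySem.Dict.mem_items_of_get?_eq_some dA hv₀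
      have hndB : dB.keys.Nodup := by rw [hkeysB]; exact hnd
      have hgB : dB.get? mtl = some (pvRender parts v₀) :=
        PySem.Dict.get?_of_mem_items dB (by rw [hrel]; exact List.mem_map.mpr ⟨(mtl, v₀), hmemA, rfl⟩) hndB
      have hgD : dA.getD mtl [] = v₀ := PySem.Dict.getD_of_mem_items dA hmemA hnd []
      have hcB : dB.contains mtl = true := by
        rw [PySem.Dict.contains_eq_isSome_get?, hgB]; rfl
      have hv₀ne : v₀ ≠ [] := hne (mtl, v₀) hmemA
      have hstepA : pvStepA dA (i, p) = dA.insert mtl (v₀ ++ [i]) := by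
        simp only [pvStepA, ← hmtl, hc, if_true, hgD]
      have hstepB : pvStepB dB (i, p) = dB.insert mtl (pvRender parts (v₀ ++ [i])) := by
        simp only [pvStepB, ← hmtl, hgB]
        rw [pvRender_snoc parts v₀ i hv₀ne, hvp, pvSlice2]
      rw [hstepA, hstepB]
      apply ih
      · exact fun q hq => hval q (by simp [hq])
      · rw [PySem.Dict.keys_insert_of_contains dA _ hc]; exact hnd
      · intro kv hkv
        rw [PySem.Dict.items_insert_of_contains dA _ hc] at hkv
        obtain ⟨kv₀, hkv₀, hkveq⟩ := List.mem_map.mp hkv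
        by_cases he : (kv₀.1 == mtl) = true
        · simp only [he, if_true] at hkveq
          subst hkveq; simp
        · simp only [he, Bool.false_eq_true, if_false] at hkveq
          subst hkveq; exact hne kv₀ hkv₀
      · rw [PySem.Dict.items_insert_of_contains dB _ hcB,
          PySem.Dict.items_insert_of_contains dA _ hc, hrel]
        rw [List.map_map, List.map_map]
        apply List.map_congr_left
        intro kv hkv
        by_cases he : (kv.1 == mtl) = true
        · have hk : kv.1 = mtl := by simpa using he
          simp [Function.comp, hk]
        · simp [Function.comp, he]
    · -- new key
      set mtl := PySem.List.pyGetD p 1 "" with hmtl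
      have hc' : dA.contains mtl = false := by
        simpa using hc
      have hcB : dB.contains mtl = false := by
        rw [PySem.Dict.contains_eq_decide_mem_keys, hkeysB,
          ← PySem.Dict.contains_eq_decide_mem_keys]
        exact hc'
      have hgB : dB.get? mtl = none := by
        have h := PySem.Dict.contains_eq_isSome_get? dB mtl
        rw [hcB] at h
        exact Option.not_isSome_iff_eq_none.mp (by rw [← h]; simp)
      have hstepA : pvStepA dA (i, p) = dA.insert mtl [i] := by
        simp only [pvStepA, ← hmtl, hc', Bool.false_eq_true, if_false]
      have hstepB : pvStepB dB (i, p) = dB.insert mtl (pvRender parts [i]) := by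
        simp only [pvStepB, ← hmtl, hgB, pvRender, List.flatMap_nil, List.append_nil, hvp]
      rw [hstepA, hstepB]
      apply ih
      · exact fun q hq => hval q (by simp [hq])
      · rw [PySem.Dict.keys_insert_of_not_contains dA _ hc']
        refine List.nodup_append.mpr ⟨hnd, by simp, ?_⟩
        intro x hx y hy
        have hy' : y = PySem.List.pyGetD p 1 "" := by simpa using hy
        subst hy'
        rw [PySem.Dict.contains_eq_decide_mem_keys] at hc'
        simp only [decide_eq_false_iff_not] at hc'
        intro heq
        rw [heq] at hx
        exact hc' hx
      · intro kv hkv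
        rw [PySem.Dict.items_insert_of_not_contains dA _ hc'] at hkv
        rcases List.mem_append.mp hkv with h | h
        · exact hne kv h
        · simp only [List.mem_singleton] at h; subst h; simp
      · rw [PySem.Dict.items_insert_of_not_contains dB _ hcB,
          PySem.Dict.items_insert_of_not_contains dA _ hc', hrel]
        simp

theorem pvEnum_snd (parts : List (List String)) :
    (PySem.List.enumerate parts).map (·.2) = parts := by
  rw [PySem.List.enumerate_eq_map_pyRange parts ([] : List String), List.map_map]
  simpa [Function.comp] using
    PySem.List.map_pyGetD_pyRange_zero (xs := parts) (d := ([] : List String))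

theorem pvA_enum (parts : List (List String)) :
    pvMtlDictA parts = (PySem.List.enumerate parts).foldl pvStepA PySem.Dict.empty := by
  unfold pvMtlDictA
  rw [PySem.List.enumerate_eq_map_pyRange parts ([] : List String), List.foldl_map]
  rfl

theorem pvB_enum (parts : List (List String)) :
    pvMergedB parts = (PySem.List.enumerate parts).foldl pvStepB PySem.Dict.empty := by
  unfold pvMergedB
  conv_lhs => rw [← pvEnum_snd parts]
  rw [List.foldl_map]
  rfl

-- ===== VERDICT (by name: the statement is the Claim_ definition above) =====
theorem merge_parts_by_mtl_spec : Claim_equal_merge_parts_by_mtl := by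
  intro parts _hdom _hpre
  unfold Spec_merge_parts_by_mtl merge_parts_by_mtl merge_parts_by_mtl_alt
  have hval : ∀ ip ∈ PySem.List.enumerate parts, PySem.List.pyGetD parts ip.1 [] = ip.2 := by
    intro ip hip
    rw [PySem.List.enumerate_eq_map_pyRange parts ([] : List String)] at hip
    obtain ⟨j, hj, rfl⟩ := List.mem_map.mp hip
    rfl
  obtain ⟨hnd, hitems⟩ := pvDict_rel parts (PySem.List.enumerate parts)
    PySem.Dict.empty PySem.Dict.empty hval
    (by simp [PySem.Dict.keys, PySem.Dict.empty])
    (by intro kv hkv; simp [PySem.Dict.empty] at hkv)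
    (by simp [PySem.Dict.empty])
  rw [← pvA_enum] at hnd hitems
  rw [← pvB_enum] at hitems
  show (pvMtlDictA parts).keys.foldl (fun acc mtl =>
      acc ++ [pvInnerA parts ((pvMtlDictA parts).getD mtl [])]) []
    = (pvMergedB parts).values
  calc (pvMtlDictA parts).keys.foldl (fun acc mtl =>
          acc ++ [pvInnerA parts ((pvMtlDictA parts).getD mtl [])]) []
      = (pvMtlDictA parts).keys.map (fun mtl =>
          pvInnerA parts ((pvMtlDictA parts).getD mtl [])) := by
        simpa using PySem.List.foldl_append_singleton_eq_map
          (fun mtl => pvInnerA parts ((pvMtlDictA parts).getD mtl [])) (pvMtlDictA parts).keys []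
    _ = (pvMtlDictA parts).items.map (fun kv => pvRender parts kv.2) := by
        rw [PySem.Dict.items_eq_map_keys (pvMtlDictA parts) hnd ([] : List Int), List.map_map]
        exact List.map_congr_left (fun k _hk => by
          simp only [Function.comp]
          exact pvInner_eq_render parts _)
    _ = (pvMergedB parts).items.map (·.2) := by
        rw [hitems, List.map_map]
        rfl
    _ = (pvMergedB parts).values := rfl
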